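-- pv_equiv track=rewrite | github.com/piScope/piScope | python/ifigure/extra/connections.py | b_check_finish
-- ===== SOURCE A (Python) =====
-- def b_check_finish(st, pos, et, rt):
--     if st in pos:
--         rt.append(st)
--         if st in et:
--             return True
--         pos.remove(st)
--         if st[1] % 2 == 0:
--             if b_check_finish((st[0]+2, st[1]), pos[:], et, rt):
--                 return True
--             if b_check_finish((st[0]-2, st[1]), pos[:], et, rt):
--                 return True
--         else:
--             if b_check_finish((st[0],   st[1]-2), pos[:], et, rt):
--                 return True
--             if b_check_finish((st[0],   st[1]+2), pos[:], et, rt):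
--                 return True
--         if b_check_finish((st[0]+1,   st[1]+1), pos[:], et, rt):
--             return True
--         if b_check_finish((st[0]+1,   st[1]-1), pos[:], et, rt):
--             return True
--         if b_check_finish((st[0]-1,   st[1]+1), pos[:], et, rt):
--             return True
--         if b_check_finish((st[0]-1,   st[1]-1), pos[:], et, rt):
--             return True
--
--     return False
-- ===== SOURCE B (Python) =====
-- def _neighbours(node):
--     x, y = node[0], node[1]
--     if y % 2 == 0:
--         first = [(x + 2, y), (x - 2, y)]
--     else:
--         first = [(x, y - 2), (x, y + 2)]
--     return first + [(x + 1, y + 1), (x + 1, y - 1), (x - 1, y + 1), (x - 1, y - 1)]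
--
-- def b_check_finish(st, pos, et, rt):
--     # Iterative DFS with an explicit LIFO stack instead of recursion; each stack
--     # entry carries its own copy of the remaining positions, and neighbours are
--     # pushed in reverse order so pop() explores them in the original's order.
--     if st not in pos:
--         return False
--     rt.append(st)
--     if st in et:
--         return True
--     pos.remove(st)
--     stack = [(n, pos[:]) for n in reversed(_neighbours(st))]
--     while stack:
--         node, p = stack.pop()
--         if node not in p:
--             continue
--         rt.append(node)
--         if node in et:
--             return True
--         p.remove(node)
--         stack.extend((n, p[:]) for n in reversed(_neighbours(node)))
--     return False
-- ===== Notes on version B (the rewrite author's own statement) =====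
-- stated objective: alternative
-- what changed: A's recursive backtracking DFS is replaced by an iterative DFS over an explicit LIFO stack whose entries pair a node with its own copy of the remaining positions; neighbours are pushed in reverse order so the pop order reproduces A's visit order exactly (same rt/pos mutations).
import Mathlib
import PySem

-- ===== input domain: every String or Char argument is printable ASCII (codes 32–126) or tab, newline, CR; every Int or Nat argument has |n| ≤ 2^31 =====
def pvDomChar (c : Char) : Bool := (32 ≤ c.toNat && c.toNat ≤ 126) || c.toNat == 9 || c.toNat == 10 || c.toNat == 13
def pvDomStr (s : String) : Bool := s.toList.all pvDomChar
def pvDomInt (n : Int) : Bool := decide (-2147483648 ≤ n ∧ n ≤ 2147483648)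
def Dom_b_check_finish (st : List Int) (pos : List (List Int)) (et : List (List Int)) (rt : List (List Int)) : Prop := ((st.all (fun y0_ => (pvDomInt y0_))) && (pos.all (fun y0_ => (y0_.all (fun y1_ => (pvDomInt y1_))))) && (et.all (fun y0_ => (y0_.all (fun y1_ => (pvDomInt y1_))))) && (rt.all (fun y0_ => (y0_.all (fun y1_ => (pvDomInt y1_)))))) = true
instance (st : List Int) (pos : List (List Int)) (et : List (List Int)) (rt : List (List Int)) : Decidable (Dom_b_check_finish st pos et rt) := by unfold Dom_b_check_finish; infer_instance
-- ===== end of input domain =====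

-- B replaces A's recursion by an iterative DFS over an explicit LIFO stack (same visit order,
-- per-entry position copies); equivalence is about the RETURN value only — both Pythons also
-- perform the same mutations of rt (append each visited node) and pos (remove st).

-- ===== PORT A =====
-- Recursive DFS exactly as in the Python: guard 'st in pos', success test 'st in et',
-- 'pos.remove(st)' (first occurrence → List.erase), then eight recursive calls in order.
-- st[0]/st[1] raise IndexError in Python when st has < 2 elements (excluded by Pre_);
-- the port returns false on that unreachable-under-Pre_ branch.
def b_check_finish (st : List Int) (pos : List (List Int)) (et : List (List Int)) (rt : List (List Int)) : Bool :=
  if h : st ∈ pos then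
    -- rt.append(st) : mutation only
    if st ∈ et then true
    else
      match PySem.List.pyGet? st 0, PySem.List.pyGet? st 1 with
      | some x, some y =>
        let pos' := pos.erase st   -- pos.remove(st)
        if PySem.Int.mod y 2 = 0 then
          if b_check_finish [x + 2, y] pos' et rt then true
          else if b_check_finish [x - 2, y] pos' et rt then true
          else if b_check_finish [x + 1, y + 1] pos' et rt then true
          else if b_check_finish [x + 1, y - 1] pos' et rt then true
          else if b_check_finish [x - 1, y + 1] pos' et rt then true
          else if b_check_finish [x - 1, y - 1] pos' et rt then true
          else false
        else
          if b_check_finish [x, y - 2] pos' et rt then true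
          else if b_check_finish [x, y + 2] pos' et rt then true
          else if b_check_finish [x + 1, y + 1] pos' et rt then true
          else if b_check_finish [x + 1, y - 1] pos' et rt then true
          else if b_check_finish [x - 1, y + 1] pos' et rt then true
          else if b_check_finish [x - 1, y - 1] pos' et rt then true
          else false
      | _, _ => false   -- IndexError in Python; outside Pre_
  else false
termination_by pos.length
decreasing_by all_goals (have h1 := List.length_erase_of_mem h; have h2 := List.length_pos_of_mem h; simp_all)

-- ===== PORT B =====
-- _neighbours(node): the parity pair first, then the four diagonals.
def pvNbrs (x y : Int) : List (List Int) :=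
  (if PySem.Int.mod y 2 = 0 then [[x + 2, y], [x - 2, y]] else [[x, y - 2], [x, y + 2]])
    ++ [[x + 1, y + 1], [x + 1, y - 1], [x - 1, y + 1], [x - 1, y - 1]]

-- B's while-loop over the explicit stack. The Python stack pops from the END and pushes
-- reversed(neighbours); here the head of the list is the top of the stack, so the
-- neighbours are prepended in their original order — the same pop sequence.
def pvDfsLoop (stack : List (List Int × List (List Int))) (et : List (List Int)) : Bool :=
  match stack with
  | [] => false
  | (node, p) :: rest =>
    if h : node ∈ p then
      -- rt.append(node) : mutation only
      if node ∈ et then true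
      else
        match PySem.List.pyGet? node 0 with
        | none => false   -- IndexError in Python; pushed nodes always have 2 elements
        | some x =>
          match PySem.List.pyGet? node 1 with
          | none => false   -- IndexError in Python; unreachable as above
          | some y => pvDfsLoop ((pvNbrs x y).map (fun n => (n, p.erase node)) ++ rest) et
    else pvDfsLoop rest et   -- continue
termination_by (stack.map (fun e => 7 ^ e.2.length)).sum
decreasing_by
  · have hlen : (p.erase node).length + 1 = p.length := List.length_erase_add_one h
    have h6 : (((pvNbrs x y).map (fun n => (n, p.erase node))).map
        (fun e => 7 ^ e.2.length)).sum = 6 * 7 ^ (p.erase node).length := by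
      unfold pvNbrs; split <;> simp <;> ring
    have hb : 1 ≤ 7 ^ (p.erase node).length := Nat.one_le_pow _ _ (by omega)
    have hlt : 6 * 7 ^ (p.erase node).length < 7 ^ p.length := by
      rw [← hlen, pow_succ]; omega
    simp only [List.map_append, List.sum_append, List.map_cons, List.sum_cons, h6]
    omega
  · have h1 : 1 ≤ 7 ^ p.length := Nat.one_le_pow _ _ (by omega)
    simp only [List.map_cons, List.sum_cons]
    omega

def b_check_finish_alt (st : List Int) (pos : List (List Int)) (et : List (List Int)) (rt : List (List Int)) : Bool :=
  if !(pos.contains st) then false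
  else
    -- rt.append(st) : mutation only
    if et.contains st then true
    else
      match PySem.List.pyGet? st 0 with
      | none => false   -- IndexError in Python; outside Pre_
      | some x =>
        match PySem.List.pyGet? st 1 with
        | none => false   -- IndexError in Python; outside Pre_
        | some y =>
          -- pos.remove(st), then seed the stack with the neighbours, each with its own copy
          pvDfsLoop ((pvNbrs x y).map (fun n => (n, pos.erase st))) et

-- ===== PRECONDITION & SPEC =====
-- Pre_ excludes exactly the inputs on which Python A raises IndexError: the top-level st
-- in pos and not in et with fewer than 2 elements (st[1] out of range; all deeper nodes
-- are 2-tuples, so only the top level can raise).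
def Pre_b_check_finish (st : List Int) (pos : List (List Int)) (et : List (List Int)) (rt : List (List Int)) : Prop :=
  st ∈ pos ∧ st ∉ et → 2 ≤ st.length
instance (st : List Int) (pos : List (List Int)) (et : List (List Int)) (rt : List (List Int)) : Decidable (Pre_b_check_finish st pos et rt) := by unfold Pre_b_check_finish; infer_instance

def pvWitness_b_check_finish : List Int × List (List Int) × List (List Int) × List (List Int) :=
  ([0, 2], [[0, 2], [1, 1]], [[1, 1]], [])

def Spec_b_check_finish (st : List Int) (pos : List (List Int)) (et : List (List Int)) (rt : List (List Int)) (out : Bool) : Prop := out = b_check_finish_alt st pos et rt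
instance (st : List Int) (pos : List (List Int)) (et : List (List Int)) (rt : List (List Int)) (out : Bool) : Decidable (Spec_b_check_finish st pos et rt out) := by unfold Spec_b_check_finish; infer_instance

-- ===== CLAIM (what is proved, stated in full; the proofs are below) =====
def Claim_equal_b_check_finish : Prop := ∀ (st : List Int) (pos : List (List Int)) (et : List (List Int)) (rt : List (List Int)), Dom_b_check_finish st pos et rt → Pre_b_check_finish st pos et rt → Spec_b_check_finish st pos et rt (b_check_finish st pos et rt)

-- ===== LEMMAS AND PROOFS =====

-- Every neighbour is a 2-element list.
theorem pvNbrs_len (x y : Int) : ∀ n ∈ pvNbrs x y, n.length = 2 := by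
  intro n hn
  unfold pvNbrs at hn
  split at hn <;> simp at hn <;>
    rcases hn with rfl | rfl | rfl | rfl | rfl | rfl <;> rfl

-- A on a found, non-final node equals the disjunction of A over its neighbour list.
theorem b_check_finish_eq_any_nbrs (node : List Int) (x y : Int) (p et rt : List (List Int))
    (hm : node ∈ p) (he : node ∉ et)
    (h0 : PySem.List.pyGet? node 0 = some x) (h1 : PySem.List.pyGet? node 1 = some y) :
    b_check_finish node p et rt
      = (pvNbrs x y).any (fun n => b_check_finish n (p.erase node) et rt) := by
  conv_lhs => rw [b_check_finish.eq_def]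
  rw [dif_pos hm, if_neg he, h0, h1]
  simp [pvNbrs, Bool.if_true_left]
  split <;> simp [Bool.or_assoc]

-- A is true on a node that is in pos and in et, false on a node not in pos.
theorem b_check_finish_found (node : List Int) (p et rt : List (List Int))
    (hm : node ∈ p) (he : node ∈ et) : b_check_finish node p et rt = true := by
  rw [b_check_finish.eq_def]; simp [hm, he]

theorem b_check_finish_absent (node : List Int) (p et rt : List (List Int))
    (hm : node ∉ p) : b_check_finish node p et rt = false := by
  rw [b_check_finish.eq_def]; simp [hm]

-- The stack loop computes, in order, the disjunction of A's recursive searches of its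
-- entries — provided every stacked node has 2 coordinates (true of every pushed node).
theorem pvDfsLoop_eq_any (stack : List (List Int × List (List Int))) (et rt : List (List Int)) :
    (∀ e ∈ stack, e.1.length = 2) →
    pvDfsLoop stack et = stack.any (fun e => b_check_finish e.1 e.2 et rt) := by
  induction stack using pvDfsLoop.induct (et := et) with
  | case1 => intro _; simp [pvDfsLoop]
  | case2 node p rest h he =>
    intro _
    rw [pvDfsLoop.eq_def]
    simp [h, he, b_check_finish_found node p et rt h he]
  | case3 node p rest h he h0 =>
    intro hs
    exfalso
    have hlen : node.length = 2 := hs (node, p) (List.mem_cons_self ..)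
    rcases node with _ | ⟨a, _ | ⟨b, tl⟩⟩ <;> simp at hlen
    simp [PySem.List.pyGet?_zero] at h0
  | case4 node p rest h he x hA h1 =>
    intro hs
    exfalso
    have hlen : node.length = 2 := hs (node, p) (List.mem_cons_self ..)
    rcases node with _ | ⟨a, _ | ⟨b, tl⟩⟩ <;> simp at hlen
    simp [PySem.List.pyGet?, PySem.List.pyIdx?] at h1
  | case5 node p rest h he x hA y hB ih =>
    intro hs
    rw [pvDfsLoop.eq_def]
    simp only [h, he, hA, hB, dif_pos]
    rw [ih (by
      intro e hee
      rcases List.mem_append.1 hee with hl | hr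
      · obtain ⟨n, hn, rfl⟩ := List.mem_map.1 hl
        exact pvNbrs_len x y n hn
      · exact hs e (List.mem_cons_of_mem _ hr))]
    simp [List.any_append, List.any_map, Function.comp_def,
      b_check_finish_eq_any_nbrs node x y p et rt h he hA hB]
  | case6 node p rest h ih =>
    intro hs
    rw [pvDfsLoop.eq_def]
    simp [h, b_check_finish_absent node p et rt h,
      ih (fun e hee => hs e (List.mem_cons_of_mem _ hee))]

-- ===== VERDICT (by name: the statement is the Claim_ definition above) =====
theorem b_check_finish_spec : Claim_equal_b_check_finish := by
  intro st pos et rt _ hpre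
  unfold Spec_b_check_finish b_check_finish_alt
  by_cases hm : st ∈ pos
  · by_cases he : st ∈ et
    · simp [hm, he, b_check_finish_found st pos et rt hm he]
    · have hlen : 2 ≤ st.length := hpre ⟨hm, he⟩
      rcases st with _ | ⟨a, _ | ⟨b, tl⟩⟩ <;> simp at hlen
      have h0 : PySem.List.pyGet? (a :: b :: tl) 0 = some a := by
        simp [PySem.List.pyGet?_zero]
      have h1 : PySem.List.pyGet? (a :: b :: tl) 1 = some b := by
        simp [PySem.List.pyGet?, PySem.List.pyIdx?]
      simp only [hm, he, h0, h1, List.contains_eq_mem, decide_true, decide_false,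
        Bool.not_true, Bool.false_eq_true, if_false]
      rw [pvDfsLoop_eq_any _ et rt (by
        intro e hee
        obtain ⟨n, hn, rfl⟩ := List.mem_map.1 hee
        exact pvNbrs_len a b n hn)]
      rw [b_check_finish_eq_any_nbrs (a :: b :: tl) a b pos et rt hm he h0 h1]
      simp [List.any_map, Function.comp_def]
  · simp [hm, b_check_finish_absent st pos et rt hm]
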